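-- pv_equiv track=rewrite | github.com/maephae/Motin | caley.py | generate_symmetric_table
-- ===== SOURCE A (Python) =====
-- import itertools
--
-- def generate_symmetric_table(n):
--     """Generates S_n (Permutations). Order: n!."""
--     perms = list(itertools.permutations(range(n)))
--     p_to_idx = {p: i for i, p in enumerate(perms)}
--     order = len(perms)
--     table = [[0] * order for _ in range(order)]
--     for i in range(order):
--         for j in range(order):
--             composed = tuple(perms[i][perms[j][k]] for k in range(n))
--             table[i][j] = p_to_idx[composed]
--     return table, perms
-- ===== SOURCE B (Python) =====
-- def generate_symmetric_table(n):
--     """Generates S_n (Permutations). Order: n!."""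
--     # Generate the permutations of range(n) by a direct lexicographic recursion
--     # (same order as itertools.permutations) and rank each composed permutation
--     # via its Lehmer code (factorial-base digits, Horner form), so no index
--     # lookup table is needed.
--     def lexperms(avail):
--         if not avail:
--             return [()]
--         return [(v,) + rest
--                 for v in avail
--                 for rest in lexperms([w for w in avail if w != v])]
--
--     def rank(p):
--         avail = list(range(len(p)))
--         r = 0
--         for v in p:
--             idx = avail.index(v)
--             r = r * len(avail) + idx
--             avail.pop(idx)
--         return r
--
--     perms = lexperms(list(range(n)))
--     table = [[rank(tuple(pi[v] for v in pj)) for pj in perms] for pi in perms]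
--     return table, perms
-- ===== Notes on version B (the rewrite author's own statement) =====
-- stated objective: alternative
-- what changed: B replaces both of A's mechanisms: permutations are generated by a direct lexicographic recursion (value-by-value with a filtered remainder) instead of itertools.permutations, and each table entry is obtained by ranking the composed permutation via its Lehmer code (factorial-base Horner digits) instead of a p_to_idx dict lookup; the table is built by iterating over the permutation lists themselves rather than over index ranges.
import Mathlib
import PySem

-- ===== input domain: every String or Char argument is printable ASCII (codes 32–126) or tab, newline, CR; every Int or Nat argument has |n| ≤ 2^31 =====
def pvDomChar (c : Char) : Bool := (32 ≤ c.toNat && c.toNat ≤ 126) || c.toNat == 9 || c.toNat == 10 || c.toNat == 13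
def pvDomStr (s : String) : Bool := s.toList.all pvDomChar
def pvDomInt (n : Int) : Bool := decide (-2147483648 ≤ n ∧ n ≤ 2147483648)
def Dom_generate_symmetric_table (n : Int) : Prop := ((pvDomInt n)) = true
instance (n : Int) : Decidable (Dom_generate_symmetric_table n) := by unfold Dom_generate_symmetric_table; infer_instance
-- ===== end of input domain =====

-- B generates the permutations by a direct lexicographic recursion instead of
-- itertools.permutations, ranks each composed permutation by its Lehmer code
-- (factorial-base Horner digits) instead of a dict lookup, and builds the table by
-- iterating over the permutation lists themselves (objective: alternative).

-- ===== PORT A =====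

-- port of itertools.permutations(s): for each choice of a first element (in positional
-- order, remaining elements keeping their order), prefix it to every permutation of the rest.
def pvSelections : List Int → List (Int × List Int)
  | [] => []
  | x :: xs => (x, xs) :: (pvSelections xs).map (fun p => (p.1, x :: p.2))

def pvPermsAux : Nat → List Int → List (List Int)
  | 0, _ => [[]]
  | k + 1, s => (pvSelections s).flatMap (fun p => (pvPermsAux k p.2).map (fun q => p.1 :: q))

def pvPerms (s : List Int) : List (List Int) := pvPermsAux s.length s

def generate_symmetric_table (n : Int) : List (List Int) × List (List Int) :=
  let perms := pvPerms (PySem.List.pyRange 0 n 1)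
  let p_to_idx := (PySem.List.enumerate perms 0).foldl (fun d ip => d.insert ip.2 ip.1) PySem.Dict.empty
  let order : Int := perms.length
  -- table[i][j] assignment loop rendered as a nested map over the same ranges;
  -- dict lookup p_to_idx[composed]: KeyError impossible (composed is always a generated key)
  let table := (PySem.List.pyRange 0 order 1).map (fun i =>
    (PySem.List.pyRange 0 order 1).map (fun j =>
      let composed := (PySem.List.pyRange 0 n 1).map (fun k =>
        PySem.List.pyGetD (PySem.List.pyGetD perms i []) (PySem.List.pyGetD (PySem.List.pyGetD perms j []) k 0) 0)
      (p_to_idx.get? composed).getD 0))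
  (table, perms)

-- ===== PORT B =====

-- port of B's lexperms: recursion on emptiness of avail, rendered with fuel = avail.length
-- (each recursive call filters out exactly one element of the nodup avail, so the fuel is exact)
def pvLexPermsAux : Nat → List Int → List (List Int)
  | 0, _ => [[]]
  | k + 1, avail => avail.flatMap (fun v =>
      (pvLexPermsAux k (avail.filter (fun w => w != v))).map (fun rest => v :: rest))

-- port of B's rank: Lehmer code in Horner form; avail.index(v) always succeeds,
-- avail.pop(idx) with the popped value discarded is avail.eraseIdx idx
def pvRank (p : List Int) : Int :=
  (p.foldl (fun st v =>
      let idx := (PySem.List.index? st.1 v).getD 0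
      (st.1.eraseIdx idx, st.2 * (st.1.length : Int) + (idx : Int)))
    (PySem.List.pyRange 0 (p.length : Int) 1, (0 : Int))).2

def generate_symmetric_table_alt (n : Int) : List (List Int) × List (List Int) :=
  let perms := pvLexPermsAux (PySem.List.pyRange 0 n 1).length (PySem.List.pyRange 0 n 1)
  let table := perms.map (fun pi =>
    perms.map (fun pj => pvRank (pj.map (fun v => PySem.List.pyGetD pi v 0))))
  (table, perms)

-- ===== PRECONDITION & SPEC =====
def Spec_generate_symmetric_table (n : Int) (out : List (List Int) × List (List Int)) : Prop := out = generate_symmetric_table_alt n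
instance (n : Int) (out : List (List Int) × List (List Int)) : Decidable (Spec_generate_symmetric_table n out) := by unfold Spec_generate_symmetric_table; infer_instance

-- ===== CLAIM (what is proved, stated in full; the proofs are below) =====
def Claim_equal_generate_symmetric_table : Prop := ∀ (n : Int), Dom_generate_symmetric_table n → Spec_generate_symmetric_table n (generate_symmetric_table n)

-- ===== LEMMAS AND PROOFS =====

theorem pvSel_fst (s : List Int) : (pvSelections s).map (·.1) = s := by
  induction s with
  | nil => rfl
  | cons x xs ih => simp [pvSelections, List.map_map, Function.comp_def, ih]

theorem pvSel_perm {s : List Int} {b : Int × List Int} (hb : b ∈ pvSelections s) :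
    (b.1 :: b.2).Perm s := by
  induction s generalizing b with
  | nil => simp [pvSelections] at hb
  | cons x xs ih =>
    simp only [pvSelections, List.mem_cons, List.mem_map] at hb
    rcases hb with h | ⟨c, hc, hcb⟩
    · subst h; exact List.Perm.refl _
    · subst hcb
      exact (List.Perm.swap x c.1 c.2).trans ((ih hc).cons x)

theorem pvSel_len {s : List Int} {b : Int × List Int} (hb : b ∈ pvSelections s) :
    b.2.length + 1 = s.length := by
  have := (pvSel_perm hb).length_eq
  simpa using this

theorem pvSel_mem {s : List Int} {a : Int} (ha : a ∈ s) :
    (a, s.erase a) ∈ pvSelections s := by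
  induction s with
  | nil => simp at ha
  | cons x xs ih =>
    by_cases hax : a = x
    · subst hax
      simp [pvSelections, List.erase_cons_head]
    · have ha' : a ∈ xs := by
        rcases List.mem_cons.1 ha with h | h
        · exact absurd h hax
        · exact h
      have : (x :: xs).erase a = x :: xs.erase a := by
        rw [List.erase_cons_tail]
        simp [Ne.symm hax]
      rw [this]
      simp only [pvSelections, List.mem_cons, List.mem_map]
      exact Or.inr ⟨(a, xs.erase a), ih ha', rfl⟩

theorem pvSel_unique {s : List Int} (hnd : s.Nodup) {b : Int × List Int}
    (hb : b ∈ pvSelections s) : b.2 = s.erase b.1 := by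
  induction s generalizing b with
  | nil => simp [pvSelections] at hb
  | cons x xs ih =>
    simp only [pvSelections, List.mem_cons, List.mem_map] at hb
    rcases hb with h | ⟨c, hc, hcb⟩
    · subst h; simp [List.erase_cons_head]
    · have hxs : x ∉ xs := (List.nodup_cons.1 hnd).1
      have hnd' : xs.Nodup := (List.nodup_cons.1 hnd).2
      have hc1 : c.1 ∈ xs := by
        have h1 : c.1 ∈ (pvSelections xs).map (·.1) := List.mem_map_of_mem hc
        rwa [pvSel_fst] at h1
      have hne : c.1 ≠ x := fun h => hxs (h ▸ hc1)
      subst hcb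
      simp only
      rw [List.erase_cons_tail (by simpa using Ne.symm hne), ih hnd' hc]

theorem pvPerms_eq_flatMap (s : List Int) (hs : s ≠ []) :
    pvPerms s = (pvSelections s).flatMap (fun b => (pvPerms b.2).map (fun q => b.1 :: q)) := by
  match s with
  | x :: xs =>
    show pvPermsAux (xs.length + 1) (x :: xs) = _
    show (pvSelections (x :: xs)).flatMap (fun p => (pvPermsAux xs.length p.2).map (fun q => p.1 :: q)) = _
    refine List.flatMap_congr (fun b hb => ?_)
    have hlen : b.2.length = xs.length := by
      have := pvSel_len hb; simpa using this
    rw [show pvPermsAux xs.length b.2 = pvPerms b.2 by rw [pvPerms, hlen]]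

theorem length_pvPerms (s : List Int) : (pvPerms s).length = s.length.factorial := by
  match s with
  | [] => rfl
  | x :: xs =>
    rw [pvPerms_eq_flatMap _ (by simp), List.length_flatMap]
    have hmap : ∀ b ∈ pvSelections (x :: xs),
        ((pvPerms b.2).map (fun q => b.1 :: q)).length = xs.length.factorial := by
      intro b hb
      have hlen : b.2.length = xs.length := by have := pvSel_len hb; simpa using this
      have : b.2.length < (x :: xs).length := by simp [hlen]
      rw [List.length_map, length_pvPerms b.2, hlen]
    calc ((pvSelections (x :: xs)).map
            (fun b => ((pvPerms b.2).map (fun q => b.1 :: q)).length)).sum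
        = ((pvSelections (x :: xs)).map (fun _ => xs.length.factorial)).sum := by
          exact congrArg List.sum (List.map_congr_left hmap)
      _ = (pvSelections (x :: xs)).length * xs.length.factorial := by
          rw [List.map_const', List.sum_replicate, smul_eq_mul]
      _ = (x :: xs).length.factorial := by
          have hl : (pvSelections (x :: xs)).length = (x :: xs).length := by
            have h := congrArg List.length (pvSel_fst (x :: xs))
            simpa using h
          rw [hl]; simp [Nat.factorial]
termination_by s.length

theorem perm_of_mem_pvPerms {s p : List Int} (hp : p ∈ pvPerms s) : p.Perm s := by
  match s with
  | [] =>
    have : p = [] := by simpa [pvPerms, pvPermsAux] using hp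
    simp [this]
  | x :: xs =>
    rw [pvPerms_eq_flatMap _ (by simp)] at hp
    rcases List.mem_flatMap.1 hp with ⟨b, hb, hpb⟩
    rcases List.mem_map.1 hpb with ⟨q, hq, hqp⟩
    have hlt : b.2.length < (x :: xs).length := by
      have h := pvSel_len hb; simp only [List.length_cons] at h ⊢; omega
    have hqperm : q.Perm b.2 := perm_of_mem_pvPerms hq
    subst hqp
    exact (hqperm.cons b.1).trans (pvSel_perm hb)
termination_by s.length
decreasing_by simpa using hlt

theorem mem_pvPerms_of_perm {p s : List Int} (hp : p.Perm s) : p ∈ pvPerms s := by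
  induction p generalizing s with
  | nil =>
    have : s = [] := by simpa using hp.symm.length_eq
    subst this; simp [pvPerms, pvPermsAux]
  | cons a q ih =>
    have ha : a ∈ s := hp.mem_iff.1 (by simp)
    have hq : q.Perm (s.erase a) := (List.cons_perm_iff_perm_erase.1 hp).2
    have hs : s ≠ [] := by rintro rfl; simp at ha
    rw [pvPerms_eq_flatMap _ hs]
    refine List.mem_flatMap.2 ⟨(a, s.erase a), pvSel_mem ha, ?_⟩
    exact List.mem_map.2 ⟨q, ih hq, rfl⟩

theorem nodup_pvPerms {s : List Int} (hnd : s.Nodup) : (pvPerms s).Nodup := by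
  match s with
  | [] => simp [pvPerms, pvPermsAux]
  | x :: xs =>
    rw [pvPerms_eq_flatMap _ (by simp)]
    rw [List.nodup_flatMap]
    constructor
    · intro b hb
      have hlt : b.2.length < (x :: xs).length := by
        have h := pvSel_len hb; simp only [List.length_cons] at h ⊢; omega
      have hbnd : b.2.Nodup := by
        have := (pvSel_perm hb).nodup_iff.2 hnd
        exact (List.nodup_cons.1 this).2
      exact (nodup_pvPerms hbnd).map (fun q q' h => by simpa using h)
    · have hfst : ((pvSelections (x :: xs)).map (·.1)).Pairwise (· ≠ ·) := by
        rw [pvSel_fst]; exact hnd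
      rw [List.pairwise_map] at hfst
      refine hfst.imp ?_
      intro b b' hne t ht ht'
      rcases List.mem_map.1 ht with ⟨q, _, hq⟩
      rcases List.mem_map.1 ht' with ⟨q', _, hq'⟩
      rw [← hq] at hq'
      injection hq' with h1 h2
      exact hne h1.symm
termination_by s.length
decreasing_by simpa using hlt

-- pvSelections of a nodup list picks each value with the rest erased
theorem pvSel_eq_map {s : List Int} (hnd : s.Nodup) :
    pvSelections s = s.map (fun v => (v, s.erase v)) := by
  induction s with
  | nil => rfl
  | cons x xs ih =>
    have hxs : x ∉ xs := (List.nodup_cons.1 hnd).1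
    have hnd' : xs.Nodup := (List.nodup_cons.1 hnd).2
    rw [pvSelections, ih hnd', List.map_map, List.map_cons, List.erase_cons_head]
    congr 1
    refine List.map_congr_left (fun v hv => ?_)
    have hvx : v ≠ x := fun h => hxs (h ▸ hv)
    simp only [Function.comp]
    rw [List.erase_cons_tail (by simpa using Ne.symm hvx)]

-- B's lexicographic recursion produces the same list as A's itertools port on nodup input
theorem lexPerms_eq {s : List Int} (hnd : s.Nodup) :
    pvLexPermsAux s.length s = pvPerms s := by
  match s with
  | [] => rfl
  | x :: xs =>
    rw [pvPerms_eq_flatMap _ (by simp), pvSel_eq_map hnd, List.flatMap_map]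
    show (x :: xs).flatMap _ = _
    refine List.flatMap_congr (fun v hv => ?_)
    have hfe : (x :: xs).filter (fun w => w != v) = (x :: xs).erase v :=
      (List.Nodup.erase_eq_filter hnd v).symm
    have hlen : ((x :: xs).erase v).length = xs.length := by
      rw [List.length_erase_of_mem hv]; simp
    have hlt : ((x :: xs).erase v).length < (x :: xs).length := by
      rw [hlen]; simp
    rw [hfe, show xs.length = ((x :: xs).erase v).length from hlen.symm,
      lexPerms_eq ((List.Nodup.erase v) hnd)]
termination_by s.length

theorem index?_map_cons (l : List (List Int)) (c : Int) (q : List Int) :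
    PySem.List.index? (l.map (fun t => c :: t)) (c :: q) = PySem.List.index? l q := by
  induction l with
  | nil => simp [PySem.List.index?]
  | cons x xs ih =>
    by_cases hx : x = q
    · subst hx
      rw [List.map_cons, PySem.List.index?_cons_self, PySem.List.index?_cons_self]
    · rw [List.map_cons,
        PySem.List.index?_cons_of_ne _ (fun h => hx (by injection h)),
        PySem.List.index?_cons_of_ne _ hx, ih]

theorem index?_append_of_not_mem {l t : List (List Int)} {v : List Int} (hv : v ∉ l) :
    PySem.List.index? (l ++ t) v = (PySem.List.index? t v).map (l.length + ·) := by
  induction l with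
  | nil => simp
  | cons x xs ih =>
    have hx : x ≠ v := fun h => hv (h ▸ List.mem_cons_self)
    have hxs : v ∉ xs := fun h => hv (List.mem_cons_of_mem _ h)
    rw [List.cons_append, PySem.List.index?_cons_of_ne _ hx, ih hxs, Option.map_map]
    congr 1
    funext k
    simp only [Function.comp, List.length_cons]
    omega

theorem index?_flatMap_split {β : Type} (pre suf : List β) (b0 : β)
    (g : β → List (List Int)) (B : Nat) (hlen : ∀ b ∈ pre, (g b).length = B)
    (p : List Int) (hnot : ∀ b ∈ pre, p ∉ g b) (hp : p ∈ g b0) :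
    PySem.List.index? ((pre ++ b0 :: suf).flatMap g) p
      = some (pre.length * B + (PySem.List.index? (g b0) p).getD 0) := by
  induction pre with
  | nil =>
    rw [List.nil_append, List.flatMap_cons, PySem.List.index?_append_of_mem _ hp]
    have hsome : (PySem.List.index? (g b0) p).isSome := (PySem.List.index?_isSome_iff _ _).2 hp
    rcases Option.isSome_iff_exists.1 hsome with ⟨t, ht⟩
    rw [ht]
    simp
  | cons x pre ih =>
    rw [List.cons_append, List.flatMap_cons,
      index?_append_of_not_mem (hnot x List.mem_cons_self),
      ih (fun b hb => hlen b (List.mem_cons_of_mem _ hb))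
        (fun b hb => hnot b (List.mem_cons_of_mem _ hb))]
    rw [hlen x List.mem_cons_self]
    simp only [Option.map_some, List.length_cons]
    congr 1
    ring

-- the Lehmer rank of p among the lexicographic-by-position permutations of s
def pvLehmer : List Int → List Int → Nat
  | _, [] => 0
  | s, a :: q => ((PySem.List.index? s a).getD 0) * (s.length - 1).factorial + pvLehmer (s.erase a) q

theorem index?_pvPerms {p s : List Int} (hnd : s.Nodup) (hp : p.Perm s) :
    PySem.List.index? (pvPerms s) p = some (pvLehmer s p) := by
  induction p generalizing s with
  | nil =>
    have : s = [] := by simpa using hp.symm.length_eq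
    subst this
    show PySem.List.index? [([] : List Int)] [] = _
    rw [PySem.List.index?_cons_self]
    rfl
  | cons a q ih =>
    have ha : a ∈ s := hp.mem_iff.1 (by simp)
    have hq : q.Perm (s.erase a) := (List.cons_perm_iff_perm_erase.1 hp).2
    have hsome : (PySem.List.index? s a).isSome := (PySem.List.index?_isSome_iff _ _).2 ha
    rcases Option.isSome_iff_exists.1 hsome with ⟨m, hm⟩
    rcases (PySem.List.index?_eq_some_iff s a m).1 hm with ⟨preS, sufS, hsplit, hlenpre, hnotpre⟩
    have hs : s ≠ [] := by rintro rfl; simp at ha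
    have hmlt : m < s.length := by rw [hsplit]; simp; omega
    have hselfst : (pvSelections s).map (·.1) = s := pvSel_fst s
    have hsellen : (pvSelections s).length = s.length := by
      have h := congrArg List.length hselfst; simpa using h
    have hmlt' : m < (pvSelections s).length := by omega
    set sel := pvSelections s with hsel
    set b0 := sel[m] with hb0
    have hb0mem : b0 ∈ sel := List.getElem_mem _
    have hb0fst : b0.1 = a := by
      have h1 : (sel.map (·.1))[m]? = s[m]? := by rw [hselfst]
      rw [List.getElem?_map, List.getElem?_eq_getElem hmlt',
        List.getElem?_eq_getElem hmlt] at h1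
      have h2 : s[m]'hmlt = a := by
        subst hsplit hlenpre
        rw [List.getElem_append_right (le_refl _)]
        simp
      rw [← h2]
      exact Option.some.inj (by simpa using h1)
    have hb0snd : b0.2 = s.erase a := by
      rw [← hb0fst]; exact pvSel_unique hnd hb0mem
    have hdecomp : sel = sel.take m ++ b0 :: sel.drop (m + 1) := by
      conv_lhs => rw [← List.take_append_drop m sel, ← List.getElem_cons_drop hmlt']
    have htakefst : (sel.take m).map (·.1) = preS := by
      rw [List.map_take, hselfst, hsplit, ← hlenpre, List.take_left]
    have hq' : q ∈ pvPerms (s.erase a) := mem_pvPerms_of_perm hq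
    have hIH := ih (hnd.erase a) hq
    rw [pvPerms_eq_flatMap s hs, ← hsel, hdecomp]
    rw [index?_flatMap_split (sel.take m) (sel.drop (m + 1)) b0 _ (s.length - 1).factorial
      (by
        intro b hb
        have hbmem : b ∈ sel := List.mem_of_mem_take hb
        have hblen := pvSel_len hbmem
        rw [List.length_map, length_pvPerms]
        congr 1
        omega)
      (a :: q)
      (by
        intro b hb hmem
        rcases List.mem_map.1 hmem with ⟨t, _, ht⟩
        have hbfst : b.1 = a := (List.cons.inj ht).1
        have : b.1 ∈ preS := by
          rw [← htakefst]; exact List.mem_map_of_mem hb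
        rw [hbfst] at this
        exact hnotpre this)
      (by
        rw [hb0snd, hb0fst]
        exact List.mem_map.2 ⟨q, hq', rfl⟩)]
    rw [hb0snd, hb0fst, index?_map_cons, hIH]
    have htklen : (sel.take m).length = m := by
      rw [List.length_take]; omega
    show _ = some (pvLehmer s (a :: q))
    rw [pvLehmer, hm, htklen]
    rfl

theorem eraseIdx_append_cons (pre suf : List Int) (a : Int) :
    (pre ++ a :: suf).eraseIdx pre.length = pre ++ suf := by
  induction pre with
  | nil => rfl
  | cons x xs ih => simpa [List.eraseIdx] using ih

theorem rank_fold {p s : List Int} (r : Int) (hnd : s.Nodup) (hp : p.Perm s) :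
    (p.foldl (fun st v =>
        let idx := (PySem.List.index? st.1 v).getD 0
        (st.1.eraseIdx idx, st.2 * (st.1.length : Int) + (idx : Int))) (s, r)).2
      = r * (s.length.factorial : Int) + (pvLehmer s p : Int) := by
  induction p generalizing s r with
  | nil =>
    have : s = [] := by simpa using hp.symm.length_eq
    subst this
    simp [pvLehmer]
  | cons a q ih =>
    have ha : a ∈ s := hp.mem_iff.1 (by simp)
    have hq : q.Perm (s.erase a) := (List.cons_perm_iff_perm_erase.1 hp).2
    have hsome : (PySem.List.index? s a).isSome := (PySem.List.index?_isSome_iff _ _).2 ha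
    rcases Option.isSome_iff_exists.1 hsome with ⟨m, hm⟩
    rcases (PySem.List.index?_eq_some_iff s a m).1 hm with ⟨preS, sufS, hsplit, hlenpre, hnotpre⟩
    have herase : s.erase a = preS ++ sufS := by
      rw [hsplit, List.erase_append_right _ hnotpre, List.erase_cons_head]
    have heidx : s.eraseIdx m = s.erase a := by
      rw [herase, hsplit, ← hlenpre, eraseIdx_append_cons]
    have hL : s.length = q.length + 1 := by
      have := hp.length_eq; simpa using this.symm
    have hLe : (s.erase a).length = q.length := by
      rw [List.length_erase_of_mem ha, hL]
      omega
    rw [List.foldl_cons]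
    simp only [hm, Option.getD_some]
    rw [heidx]
    rw [ih (r * (s.length : Int) + (m : Int)) (hnd.erase a) hq]
    rw [pvLehmer, hm, Option.getD_some, hLe, hL]
    simp only [Nat.add_sub_cancel, Nat.factorial_succ]
    push_cast
    ring

theorem dict_get (perms : List (List Int)) (hnd : perms.Nodup) {p : List Int} {m : Nat}
    (hm : PySem.List.index? perms p = some m) :
    ((PySem.List.enumerate perms 0).foldl (fun d ip => d.insert ip.2 ip.1) PySem.Dict.empty).get? p
      = some (m : Int) := by
  have hitems := PySem.Dict.items_foldl_insert_fresh (PySem.List.enumerate perms 0)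
    (fun ip => ip.2) (fun ip => ip.1) PySem.Dict.empty
    (fun a _ => by simp)
    (by rw [PySem.List.map_snd_enumerate]; exact hnd)
  have hkeys := PySem.Dict.nodup_keys_foldl_insert_key (PySem.List.enumerate perms 0)
    (fun ip => ip.2) (fun _ ip => ip.1) PySem.Dict.empty (by simp)
  rcases PySem.List.getElem_of_index?_eq_some hm with ⟨hk, hpm, -⟩
  have hmem : ((m : Int), p) ∈ PySem.List.enumerate perms 0 :=
    (PySem.List.mem_enumerate_iff perms 0 _).2 ⟨m, hk, by simp [hpm]⟩
  refine PySem.Dict.get?_of_mem_items _ ?_ hkeys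
  rw [hitems]
  exact List.mem_map.2 ⟨((m : Int), p), hmem, rfl⟩

-- indexing a permutation of range(n) by all of range(n) rebuilds it
theorem map_pyGetD_perm {n : Int} {P : List Int} (hP : P.Perm (PySem.List.pyRange 0 n 1)) :
    (PySem.List.pyRange 0 n 1).map (fun k => PySem.List.pyGetD P k 0) = P := by
  by_cases hn : 0 ≤ n
  · have hPlen : (P.length : Int) = n := by
      have h1 : P.length = (PySem.List.pyRange 0 n 1).length := hP.length_eq
      rw [h1, PySem.List.length_pyRange_one]
      omega
    rw [← hPlen]
    exact PySem.List.map_pyGetD_pyRange_zero' P 0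
  · have hsnil : PySem.List.pyRange 0 n 1 = [] := PySem.List.pyRange_one_eq_nil (by omega)
    have hPnil : P = [] := by
      have := hP.length_eq; rw [hsnil] at this; simpa using this
    rw [hsnil, hPnil]; rfl

-- range(len(p)) for p a permutation of range(n) is range(n)
theorem pyRange_length_perm {n : Int} {p : List Int} (hp : p.Perm (PySem.List.pyRange 0 n 1)) :
    PySem.List.pyRange 0 (p.length : Int) 1 = PySem.List.pyRange 0 n 1 := by
  have hl : p.length = (PySem.List.pyRange 0 n 1).length := hp.length_eq
  rw [hl, PySem.List.length_pyRange_one]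
  by_cases hn : 0 ≤ n
  · congr 1
    omega
  · rw [PySem.List.pyRange_one_eq_nil (by omega),
      PySem.List.pyRange_one_eq_nil (by omega)]

-- B's Horner fold computes the Lehmer rank
theorem pvRank_eq {n : Int} {p : List Int} (hp : p.Perm (PySem.List.pyRange 0 n 1)) :
    pvRank p = (pvLehmer (PySem.List.pyRange 0 n 1) p : Int) := by
  unfold pvRank
  rw [pyRange_length_perm hp,
    rank_fold 0 (PySem.List.nodup_pyRange_one 0 n) hp]
  simp

-- reading out a list by pyGetD over range(len) and then mapping f is mapping f directly
theorem map_range_getD {α : Type} (P : List (List Int)) (f : List Int → α) :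
    (PySem.List.pyRange 0 (P.length : Int) 1).map (fun i => f (PySem.List.pyGetD P i [])) = P.map f := by
  have h := congrArg (List.map f) (PySem.List.map_pyGetD_pyRange_zero' P ([] : List Int))
  rw [List.map_map] at h
  exact h

-- both entry computations equal the Lehmer rank of the composition
theorem entry_eq (n : Int) {pi pj : List Int}
    (hpi : pi ∈ pvPerms (PySem.List.pyRange 0 n 1))
    (hpj : pj ∈ pvPerms (PySem.List.pyRange 0 n 1)) :
    ((((PySem.List.enumerate (pvPerms (PySem.List.pyRange 0 n 1)) 0).foldl
        (fun d ip => d.insert ip.2 ip.1) PySem.Dict.empty).get?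
        ((PySem.List.pyRange 0 n 1).map (fun k =>
          PySem.List.pyGetD pi (PySem.List.pyGetD pj k 0) 0))).getD 0)
      = pvRank (pj.map (fun v => PySem.List.pyGetD pi v 0)) := by
  set s := PySem.List.pyRange 0 n 1 with hs
  have hnds : s.Nodup := PySem.List.nodup_pyRange_one 0 n
  have hnod : (pvPerms s).Nodup := nodup_pvPerms hnds
  have hPiperm : pi.Perm s := perm_of_mem_pvPerms hpi
  have hPjperm : pj.Perm s := perm_of_mem_pvPerms hpj
  have hcomp : s.map (fun k => PySem.List.pyGetD pi (PySem.List.pyGetD pj k 0) 0)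
      = pj.map (fun v => PySem.List.pyGetD pi v 0) := by
    conv_rhs => rw [← map_pyGetD_perm hPjperm, List.map_map]
    rfl
  have hcperm : (pj.map (fun v => PySem.List.pyGetD pi v 0)).Perm s := by
    exact (hPjperm.map _).trans (by rw [map_pyGetD_perm hPiperm]; exact hPiperm)
  rw [hcomp, dict_get (pvPerms s) hnod (index?_pvPerms hnds hcperm),
    pvRank_eq hcperm]
  rfl

-- ===== VERDICT (by name: the statement is the Claim_ definition above) =====
set_option maxHeartbeats 2000000 in
theorem generate_symmetric_table_spec : Claim_equal_generate_symmetric_table := by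
  intro n _
  show generate_symmetric_table n = generate_symmetric_table_alt n
  simp only [generate_symmetric_table, generate_symmetric_table_alt]
  rw [lexPerms_eq (PySem.List.nodup_pyRange_one 0 n), Prod.mk.injEq]
  refine ⟨?_, rfl⟩
  calc (PySem.List.pyRange 0 ((pvPerms (PySem.List.pyRange 0 n 1)).length : Int) 1).map (fun i =>
        (PySem.List.pyRange 0 ((pvPerms (PySem.List.pyRange 0 n 1)).length : Int) 1).map (fun j =>
          ((((PySem.List.enumerate (pvPerms (PySem.List.pyRange 0 n 1)) 0).foldl
              (fun d ip => d.insert ip.2 ip.1) PySem.Dict.empty).get?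
              ((PySem.List.pyRange 0 n 1).map (fun k =>
                PySem.List.pyGetD (PySem.List.pyGetD (pvPerms (PySem.List.pyRange 0 n 1)) i [])
                  (PySem.List.pyGetD (PySem.List.pyGetD (pvPerms (PySem.List.pyRange 0 n 1)) j []) k 0) 0))).getD 0)))
      = (PySem.List.pyRange 0 ((pvPerms (PySem.List.pyRange 0 n 1)).length : Int) 1).map (fun i =>
        (pvPerms (PySem.List.pyRange 0 n 1)).map (fun pj =>
          ((((PySem.List.enumerate (pvPerms (PySem.List.pyRange 0 n 1)) 0).foldl
              (fun d ip => d.insert ip.2 ip.1) PySem.Dict.empty).get?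
              ((PySem.List.pyRange 0 n 1).map (fun k =>
                PySem.List.pyGetD (PySem.List.pyGetD (pvPerms (PySem.List.pyRange 0 n 1)) i [])
                  (PySem.List.pyGetD pj k 0) 0))).getD 0))) :=
        List.map_congr_left (fun i _ => map_range_getD (pvPerms (PySem.List.pyRange 0 n 1))
          (fun pj =>
            ((((PySem.List.enumerate (pvPerms (PySem.List.pyRange 0 n 1)) 0).foldl
                (fun d ip => d.insert ip.2 ip.1) PySem.Dict.empty).get?
                ((PySem.List.pyRange 0 n 1).map (fun k =>
                  PySem.List.pyGetD (PySem.List.pyGetD (pvPerms (PySem.List.pyRange 0 n 1)) i [])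
                    (PySem.List.pyGetD pj k 0) 0))).getD 0)))
    _ = (pvPerms (PySem.List.pyRange 0 n 1)).map (fun pi =>
        (pvPerms (PySem.List.pyRange 0 n 1)).map (fun pj =>
          ((((PySem.List.enumerate (pvPerms (PySem.List.pyRange 0 n 1)) 0).foldl
              (fun d ip => d.insert ip.2 ip.1) PySem.Dict.empty).get?
              ((PySem.List.pyRange 0 n 1).map (fun k =>
                PySem.List.pyGetD pi (PySem.List.pyGetD pj k 0) 0))).getD 0))) :=
        map_range_getD (pvPerms (PySem.List.pyRange 0 n 1))
          (fun pi => (pvPerms (PySem.List.pyRange 0 n 1)).map (fun pj =>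
            ((((PySem.List.enumerate (pvPerms (PySem.List.pyRange 0 n 1)) 0).foldl
                (fun d ip => d.insert ip.2 ip.1) PySem.Dict.empty).get?
                ((PySem.List.pyRange 0 n 1).map (fun k =>
                  PySem.List.pyGetD pi (PySem.List.pyGetD pj k 0) 0))).getD 0)))
    _ = (pvPerms (PySem.List.pyRange 0 n 1)).map (fun pi =>
        (pvPerms (PySem.List.pyRange 0 n 1)).map (fun pj =>
          pvRank (pj.map (fun v => PySem.List.pyGetD pi v 0)))) :=
        List.map_congr_left (fun pi hpi =>
          List.map_congr_left (fun pj hpj => entry_eq n hpi hpj))
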